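-- pv_equiv track=rewrite | github.com/mortyc126-debug/rayon | src/thermodynamics_of_computation.py | dfs_with_cascade
-- ===== SOURCE A (Python) =====
-- def propagate(gates, n, fixed):
--     """Propagate constants. Return output value or None."""
--     wv = dict(fixed)
--     for gt, i1, i2, o in gates:
--         v1 = wv.get(i1)
--         v2 = wv.get(i2)
--         if gt == 'AND':
--             if v1 == 0 or v2 == 0: wv[o] = 0
--             elif v1 is not None and v2 is not None: wv[o] = v1 & v2
--         elif gt == 'OR':
--             if v1 == 1 or v2 == 1: wv[o] = 1
--             elif v1 is not None and v2 is not None: wv[o] = v1 | v2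
--         elif gt == 'NOT':
--             if v1 is not None: wv[o] = 1 - v1
--     return wv.get(gates[-1][3]) if gates else None
--
-- def dfs_with_cascade(gates, n, fixed=None, stats=None):
--     """DFS SAT solver with constant propagation."""
--     if fixed is None: fixed = {}
--     if stats is None: stats = {'nodes': 0}
--     stats['nodes'] += 1
--
--     out = propagate(gates, n, fixed)
--     if out is not None:
--         return out == 1
--
--     unfixed = [i for i in range(n) if i not in fixed]
--     if not unfixed:
--         return False
--
--     var = unfixed[0]
--     for val in [0, 1]:
--         fixed[var] = val
--         if dfs_with_cascade(gates, n, fixed, stats):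
--             del fixed[var]
--             return True
--         del fixed[var]
--     return False
-- ===== SOURCE B (Python) =====
-- def propagate(gates, n, fixed):
--     """Propagate constants. Return output value or None."""
--     wv = dict(fixed)
--     for gt, i1, i2, o in gates:
--         v1 = wv.get(i1)
--         v2 = wv.get(i2)
--         if gt == 'AND':
--             if v1 == 0 or v2 == 0: wv[o] = 0
--             elif v1 is not None and v2 is not None: wv[o] = v1 & v2
--         elif gt == 'OR':
--             if v1 == 1 or v2 == 1: wv[o] = 1
--             elif v1 is not None and v2 is not None: wv[o] = v1 | v2
--         elif gt == 'NOT':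
--             if v1 is not None: wv[o] = 1 - v1
--     return wv.get(gates[-1][3]) if gates else None
--
-- def dfs_with_cascade(gates, n, fixed=None, stats=None):
--     """Iterative DFS over an explicit frontier stack of assignment maps.
--     No recursion, no undo: sibling branches are pushed as independent states
--     (value 1 below value 0, so 0 is explored first like A's pre-order).
--     Return value only: unlike A, B mutates neither `fixed` nor `stats`."""
--     stack = [{} if fixed is None else dict(fixed)]
--     while stack:
--         asg = stack.pop()
--         out = propagate(gates, n, asg)
--         if out is not None:
--             if out == 1:
--                 return True
--             continue
--         var = next((i for i in range(n) if i not in asg), None)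
--         if var is None:
--             continue
--         stack.append({**asg, var: 1})
--         stack.append({**asg, var: 0})
--     return False
-- ===== Notes on version B (the rewrite author's own statement) =====
-- stated objective: alternative
-- what changed: B replaces A's backtracking recursion with a shared mutated dict (assign, recurse, del-undo, early return) by a non-recursive worklist loop: an explicit stack of independent assignment maps is popped and extended until a satisfying determined state is found or the stack empties; fixed and stats are never mutated (return value only).
import Mathlib
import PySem

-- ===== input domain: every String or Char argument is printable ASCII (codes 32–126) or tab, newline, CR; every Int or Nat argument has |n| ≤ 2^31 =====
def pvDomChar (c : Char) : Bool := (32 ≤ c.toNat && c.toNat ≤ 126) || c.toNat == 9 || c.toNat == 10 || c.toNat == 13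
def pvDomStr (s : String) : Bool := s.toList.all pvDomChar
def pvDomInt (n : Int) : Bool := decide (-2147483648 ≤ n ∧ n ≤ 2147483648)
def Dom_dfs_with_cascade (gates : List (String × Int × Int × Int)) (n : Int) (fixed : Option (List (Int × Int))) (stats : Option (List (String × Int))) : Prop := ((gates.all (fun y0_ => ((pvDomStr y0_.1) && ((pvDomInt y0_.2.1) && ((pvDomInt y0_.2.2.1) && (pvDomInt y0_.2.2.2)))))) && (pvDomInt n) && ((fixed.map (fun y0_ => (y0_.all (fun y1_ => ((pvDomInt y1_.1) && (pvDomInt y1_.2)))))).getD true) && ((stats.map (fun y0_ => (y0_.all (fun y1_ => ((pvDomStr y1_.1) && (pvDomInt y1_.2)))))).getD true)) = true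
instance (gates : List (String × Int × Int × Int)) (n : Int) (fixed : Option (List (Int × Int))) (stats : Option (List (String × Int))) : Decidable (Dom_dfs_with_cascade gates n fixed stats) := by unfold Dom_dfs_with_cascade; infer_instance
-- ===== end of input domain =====

-- B replaces A's backtracking recursion (shared mutated dict, del-undo, early return) by a
-- non-recursive worklist loop over an explicit stack of independent assignment maps (objective:
-- alternative). A mutates `fixed` and `stats` in place; B does not — the equivalence proved here
-- is about the RETURN value only.

-- ===== PORT A =====
-- shared helper: Python `propagate` (used verbatim by both A and B)
def propagate (gates : List (String × Int × Int × Int)) (_n : Int) (fixed : PySem.Dict Int Int) : Option Int :=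
  let wv := gates.foldl (fun (wv : PySem.Dict Int Int) g =>
    let gt := g.1; let i1 := g.2.1; let i2 := g.2.2.1; let o := g.2.2.2
    let v1 := wv.get? i1
    let v2 := wv.get? i2
    if gt == "AND" then
      if v1 == some 0 || v2 == some 0 then wv.insert o 0
      else match v1, v2 with
        | some a, some b => wv.insert o (PySem.Int.band a b)
        | _, _ => wv
    else if gt == "OR" then
      if v1 == some 1 || v2 == some 1 then wv.insert o 1
      else match v1, v2 with
        | some a, some b => wv.insert o (PySem.Int.bor a b)
        | _, _ => wv
    else if gt == "NOT" then
      match v1 with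
      | some a => wv.insert o (1 - a)
      | none => wv
    else wv) fixed
  match gates.getLast? with
  | some g => wv.get? g.2.2.2
  | none => none

-- shared helper: the `fixed=None → {}` default (a dict argument arrives as an association list)
def pvInitFixed (fixed : Option (List (Int × Int))) : PySem.Dict Int Int :=
  match fixed with
  | none => PySem.Dict.empty
  | some l => PySem.Dict.ofList l

-- A's per-node list `[i for i in range(n) if i not in fixed]`
def pvUnfixed (n : Int) (d : PySem.Dict Int Int) : List Int :=
  (PySem.List.pyRange 0 n 1).filter (fun i => !(d.contains i))

-- termination facts for both recursions (cited by `decreasing_by`)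
lemma pyRange_one_nodup (a b : Int) : (PySem.List.pyRange a b 1).Nodup := by
  by_cases hab : a < b
  · rw [PySem.List.pyRange_one_cons hab, List.nodup_cons]
    exact ⟨fun hm => by have := (PySem.List.mem_pyRange_one.mp hm).1; omega,
           pyRange_one_nodup (a + 1) b⟩
  · have : PySem.List.pyRange a b 1 = [] := by simp [PySem.List.pyRange]; omega
    simp [this]
termination_by (b - a).toNat
decreasing_by omega

lemma pvUnfixed_insert (n : Int) (d : PySem.Dict Int Int) (var : Int) (v : Int)
    (rest : List Int) (h : pvUnfixed n d = var :: rest) :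
    pvUnfixed n (d.insert var v) = rest := by
  have hq : pvUnfixed n (d.insert var v)
      = (pvUnfixed n d).filter (fun i => !(i == var)) := by
    unfold pvUnfixed
    rw [List.filter_filter]
    apply List.filter_congr
    intro i _
    rw [PySem.Dict.contains_insert]
    cases (i == var) <;> cases d.contains i <;> simp
  have hnd : (pvUnfixed n d).Nodup := List.Nodup.filter _ (pyRange_one_nodup 0 n)
  rw [h] at hnd
  have hvr : var ∉ rest := (List.nodup_cons.mp hnd).1
  rw [hq, h, List.filter_cons_of_neg (by simp)]
  exact List.filter_eq_self.mpr (fun x hx => by simp; exact fun he => hvr (he ▸ hx))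

lemma pvUnfixed_insert_length_lt (n : Int) (d : PySem.Dict Int Int) (var : Int) (v : Int)
    (rest : List Int) (h : pvUnfixed n d = var :: rest) :
    (pvUnfixed n (d.insert var v)).length < (pvUnfixed n d).length := by
  rw [pvUnfixed_insert n d var v rest h, h]; simp

-- A's recursive body on the working dict (faithful: re-derives `unfixed` at every node,
-- tries val = 0 then val = 1, returns True on the first satisfying branch)
def pvDfsA (gates : List (String × Int × Int × Int)) (n : Int) (fixed : PySem.Dict Int Int) : Bool :=
  match propagate gates n fixed with
  | some out => out == 1
  | none =>
    match h : pvUnfixed n fixed with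
    | [] => false
    | var :: _ =>
      if pvDfsA gates n (fixed.insert var 0) then true
      else if pvDfsA gates n (fixed.insert var 1) then true
      else false
termination_by (pvUnfixed n fixed).length
decreasing_by
  · exact pvUnfixed_insert_length_lt n fixed var 0 _ h
  · exact pvUnfixed_insert_length_lt n fixed var 1 _ h

def dfs_with_cascade (gates : List (String × Int × Int × Int)) (n : Int) (fixed : Option (List (Int × Int))) (stats : Option (List (String × Int))) : Bool :=
  -- `stats` is only ever mutated by A, never read for the result; the port carries it unused
  pvDfsA gates n (pvInitFixed fixed)

-- ===== PORT B =====
-- measure for B's worklist loop: sum over the stack of 3^(number of unfixed vars)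
def pvMeas (n : Int) (s : List (PySem.Dict Int Int)) : Nat :=
  (s.map (fun d => 3 ^ (pvUnfixed n d).length)).sum

-- B's worklist loop: pop a state, settle it or push its two children (val 1 below val 0)
def pvLoopB (gates : List (String × Int × Int × Int)) (n : Int)
    (stack : List (PySem.Dict Int Int)) : Bool :=
  match stack with
  | [] => false
  | d :: s =>
    match propagate gates n d with
    | some out => if out == 1 then true else pvLoopB gates n s
    | none =>
      match h : pvUnfixed n d with
      | [] => pvLoopB gates n s
      | var :: rest => pvLoopB gates n (d.insert var 0 :: d.insert var 1 :: s)
termination_by pvMeas n stack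
decreasing_by
  · simp only [pvMeas, List.map_cons, List.sum_cons]
    have := Nat.pow_pos (n := (pvUnfixed n d).length) (show 0 < 3 by norm_num)
    omega
  · simp only [pvMeas, List.map_cons, List.sum_cons]
    rw [pvUnfixed_insert n d var 0 _ h, pvUnfixed_insert n d var 1 _ h, h]
    simp only [List.length_cons, pow_succ]
    have h3 := Nat.pow_pos (n := rest.length) (show 0 < 3 by norm_num)
    omega

def dfs_with_cascade_alt (gates : List (String × Int × Int × Int)) (n : Int) (fixed : Option (List (Int × Int))) (stats : Option (List (String × Int))) : Bool :=
  pvLoopB gates n [pvInitFixed fixed]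

-- ===== PRECONDITION & SPEC =====
-- Python A executes stats['nodes'] += 1, raising KeyError when a stats dict without the
-- key 'nodes' is supplied; Pre_ excludes exactly those inputs (A raises, it returns nowhere else).
def Pre_dfs_with_cascade (gates : List (String × Int × Int × Int)) (n : Int) (fixed : Option (List (Int × Int))) (stats : Option (List (String × Int))) : Prop :=
  (stats.map (fun l => l.any (fun p => p.1 == "nodes"))).getD true = true
instance (gates : List (String × Int × Int × Int)) (n : Int) (fixed : Option (List (Int × Int))) (stats : Option (List (String × Int))) : Decidable (Pre_dfs_with_cascade gates n fixed stats) := by unfold Pre_dfs_with_cascade; infer_instance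
def pvWitness_dfs_with_cascade : (List (String × Int × Int × Int)) × Int × (Option (List (Int × Int))) × (Option (List (String × Int))) := ([("AND", 0, 1, 2)], 2, none, some [("nodes", 0)])

def Spec_dfs_with_cascade (gates : List (String × Int × Int × Int)) (n : Int) (fixed : Option (List (Int × Int))) (stats : Option (List (String × Int))) (out : Bool) : Prop := out = dfs_with_cascade_alt gates n fixed stats
instance (gates : List (String × Int × Int × Int)) (n : Int) (fixed : Option (List (Int × Int))) (stats : Option (List (String × Int))) (out : Bool) : Decidable (Spec_dfs_with_cascade gates n fixed stats out) := by unfold Spec_dfs_with_cascade; infer_instance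

-- ===== CLAIM (what is proved, stated in full; the proofs are below) =====
def Claim_equal_dfs_with_cascade : Prop := ∀ (gates : List (String × Int × Int × Int)) (n : Int) (fixed : Option (List (Int × Int))) (stats : Option (List (String × Int))), Dom_dfs_with_cascade gates n fixed stats → Pre_dfs_with_cascade gates n fixed stats → Spec_dfs_with_cascade gates n fixed stats (dfs_with_cascade gates n fixed stats)

-- ===== LEMMAS AND PROOFS =====
-- main invariant: processing the top of B's stack is A's recursion on that state,
-- disjoined with the rest of the stack
lemma pvLoopB_cons (gates : List (String × Int × Int × Int)) (n : Int) :
    ∀ (k : Nat) (d : PySem.Dict Int Int) (s : List (PySem.Dict Int Int)),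
      (pvUnfixed n d).length = k →
      pvLoopB gates n (d :: s) = (pvDfsA gates n d || pvLoopB gates n s) := by
  intro k
  induction k with
  | zero =>
    intro d s hk
    rw [pvLoopB.eq_def, pvDfsA]
    dsimp only
    cases hp : propagate gates n d
    · simp only []
      cases hu : pvUnfixed n d with
      | nil => simp
      | cons v r => rw [hu] at hk; simp at hk
    · rename_i out
      simp only []
      cases ho : (out == 1) <;> simp_all
  | succ k ih =>
    intro d s hk
    rw [pvLoopB.eq_def, pvDfsA]
    dsimp only
    cases hp : propagate gates n d
    · simp only []
      cases hu : pvUnfixed n d with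
      | nil => simp
      | cons var rest =>
        have h0 : pvUnfixed n (d.insert var 0) = rest := pvUnfixed_insert n d var 0 rest hu
        have h1 : pvUnfixed n (d.insert var 1) = rest := pvUnfixed_insert n d var 1 rest hu
        have hkr : rest.length = k := by rw [hu] at hk; simpa using hk
        dsimp only
        rw [ih (d.insert var 0) (d.insert var 1 :: s) (by rw [h0]; exact hkr),
            ih (d.insert var 1) s (by rw [h1]; exact hkr)]
        cases pvDfsA gates n (d.insert var 0) <;>
          cases pvDfsA gates n (d.insert var 1) <;> simp
    · rename_i out
      simp only []
      cases ho : (out == 1) <;> simp_all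

-- ===== VERDICT (by name: the statements are the Claim_ definitions above) =====
theorem dfs_with_cascade_spec : Claim_equal_dfs_with_cascade := by
  intro gates n fixed stats _ _
  unfold Spec_dfs_with_cascade dfs_with_cascade dfs_with_cascade_alt
  rw [pvLoopB_cons gates n (pvUnfixed n (pvInitFixed fixed)).length (pvInitFixed fixed) [] rfl]
  have hnil : pvLoopB gates n [] = false := by rw [pvLoopB.eq_def]
  rw [hnil, Bool.or_false]
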